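-- pv_equiv track=rewrite | github.com/opnfv/releng-xci | infra_manager/filter_plugins/nodes.py | role2nodes
-- ===== SOURCE A (Python) =====
-- def role2nodes(nodes_roles):
--     """Get a dictionnary containing nodes associate to a role
--
--     Args:
--         nodes_roles: nodes_roles list from IDF
--
--     Returns:
--         {'controller': [], 'compute': [], 'storage': [], 'network': []...}
--     """
--     roles = {}
--     for node in sorted(nodes_roles):
--         for role in nodes_roles[node]:
--             if role not in roles.keys():
--                 roles[role] = []
--             roles[role].append(node)
--     return roles
-- ===== SOURCE B (Python) =====
-- def role2nodes(nodes_roles):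
--     """Group nodes by role: flatten sorted items to (role, node) pairs, take the
--     role key order with dict.fromkeys, then collect each bucket by filtering the
--     pairs - no incremental per-role bucket mutation."""
--     pairs = [(role, node) for node in sorted(nodes_roles) for role in nodes_roles[node]]
--     order = list(dict.fromkeys(role for role, _ in pairs))
--     return {role: [n for r, n in pairs if r == role] for role in order}
-- ===== Notes on version B (the rewrite author's own statement) =====
-- stated objective: alternative
-- what changed: B abandons A's incremental dict mutation (membership test, create-empty bucket, append per node): it flattens the sorted items into (role, node) pairs, derives the role key order once with dict.fromkeys, and builds each bucket in one shot by filtering the pair list per role.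
import Mathlib
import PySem

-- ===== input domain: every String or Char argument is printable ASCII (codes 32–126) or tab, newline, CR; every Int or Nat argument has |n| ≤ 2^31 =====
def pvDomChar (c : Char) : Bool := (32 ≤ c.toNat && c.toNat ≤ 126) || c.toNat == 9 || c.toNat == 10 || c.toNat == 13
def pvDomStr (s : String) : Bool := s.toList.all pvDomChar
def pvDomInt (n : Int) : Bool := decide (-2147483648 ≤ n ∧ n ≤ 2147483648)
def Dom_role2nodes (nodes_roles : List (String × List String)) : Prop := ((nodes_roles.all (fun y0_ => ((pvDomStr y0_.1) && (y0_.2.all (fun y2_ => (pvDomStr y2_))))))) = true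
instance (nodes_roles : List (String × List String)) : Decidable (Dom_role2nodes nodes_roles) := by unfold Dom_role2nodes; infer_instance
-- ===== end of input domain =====

-- B flattens the sorted items to (role, node) pairs, derives the role key order with an
-- ordered dedup, and builds each bucket by filtering the pairs; equal return value (alternative).

-- ===== PORT A =====
def role2nodes (nodes_roles : List (String × List String)) : List (String × List String) :=
  ((PySem.List.sorted (PySem.Dict.keys (PySem.Dict.mk nodes_roles)) (fun x => x) false).foldl
    (fun roles node =>
      (PySem.Dict.getD (PySem.Dict.mk nodes_roles) node []).foldl
        (fun roles role =>
          let roles' := if role ∈ PySem.Dict.keys roles then roles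
                        else PySem.Dict.insert roles role ([] : List String)
          PySem.Dict.modify roles' role [] (fun l => l ++ [node]))
        roles)
    PySem.Dict.empty).items

-- ===== PORT B =====
def role2nodes_alt (nodes_roles : List (String × List String)) : List (String × List String) :=
  let pairs := (PySem.List.sorted (PySem.Dict.keys (PySem.Dict.mk nodes_roles)) (fun x => x) false).flatMap
      (fun node => (PySem.Dict.getD (PySem.Dict.mk nodes_roles) node []).map (fun role => (role, node)))
  let order := PySem.List.dedup (pairs.map (·.1))
  (order.foldl
    (fun d role => PySem.Dict.insert d role ((pairs.filter (fun rn => rn.1 == role)).map (·.2)))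
    PySem.Dict.empty).items

-- ===== PRECONDITION & SPEC =====
-- Pre_ requires distinct keys: the association list encodes a Python dict, which cannot hold
-- duplicate keys, so no input the Python A accepts is excluded.
def Pre_role2nodes (nodes_roles : List (String × List String)) : Prop :=
  (nodes_roles.map Prod.fst).Nodup
instance (nodes_roles : List (String × List String)) : Decidable (Pre_role2nodes nodes_roles) := by unfold Pre_role2nodes; infer_instance

def pvWitness_role2nodes : (List (String × List String)) :=
  [("node2", ["compute", "storage"]), ("node1", ["controller", "compute"])]

def Spec_role2nodes (nodes_roles : List (String × List String)) (out : List (String × List String)) : Prop := out = role2nodes_alt nodes_roles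
instance (nodes_roles : List (String × List String)) (out : List (String × List String)) : Decidable (Spec_role2nodes nodes_roles out) := by unfold Spec_role2nodes; infer_instance

-- ===== CLAIM (what is proved, stated in full; the proofs are below) =====
def Claim_equal_role2nodes : Prop := ∀ (nodes_roles : List (String × List String)), Dom_role2nodes nodes_roles → Pre_role2nodes nodes_roles → Spec_role2nodes nodes_roles (role2nodes nodes_roles)

-- ===== LEMMAS AND PROOFS =====

-- A's inner-loop body (membership test, create-empty bucket, append) is, for every dictionary
-- state, extensionally the single "modify role [] (· ++ [node])" step.
theorem bodyEq (d : PySem.Dict String (List String)) (role node : String) :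
    (let d' := if role ∈ PySem.Dict.keys d then d
               else PySem.Dict.insert d role ([] : List String)
     PySem.Dict.modify d' role [] (fun l => l ++ [node]))
    = PySem.Dict.modify d role [] (fun l => l ++ [node]) := by
  by_cases h : role ∈ PySem.Dict.keys d
  · simp [h]
  · have hc : PySem.Dict.contains d role = false := by
      rw [← Bool.not_eq_true, PySem.Dict.contains_iff_mem_keys]; exact h
    simp [h, PySem.Dict.modify, PySem.Dict.getD_insert_self,
      PySem.Dict.insert_insert_self, PySem.Dict.getD_of_not_contains _ _ hc]

-- the items of the pair-grouping fold, characterised pointwise via the PySem grouping lemmas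
theorem groupedItems (pairs : List (String × String)) :
    (pairs.foldl (fun d p => PySem.Dict.modify d p.1 [] (fun l => l ++ [p.2]))
        (PySem.Dict.empty : PySem.Dict String (List String))).items
    = (PySem.List.dedup (pairs.map (·.1))).map
        (fun role => (role, (pairs.filter (fun rn => rn.1 == role)).map (·.2))) := by
  have hnd : (pairs.foldl (fun d p => PySem.Dict.modify d p.1 [] (fun l => l ++ [p.2]))
      (PySem.Dict.empty : PySem.Dict String (List String))).keys.Nodup :=
    PySem.Dict.nodup_keys_foldl_modify_key pairs (·.1) [] _ _ PySem.Dict.nodup_keys_empty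
  rw [PySem.Dict.items_eq_map_keys _ hnd ([] : List String)]
  have hkeys : (pairs.foldl (fun d p => PySem.Dict.modify d p.1 [] (fun l => l ++ [p.2]))
      (PySem.Dict.empty : PySem.Dict String (List String))).keys
      = PySem.List.dedup (pairs.map (·.1)) := by
    rw [PySem.Dict.keys_foldl_modify_key pairs (·.1) [] _ _]
    simp [PySem.Dict.keys_empty, PySem.Set.update_nil_left, PySem.List.dedup_eq_ofList]
  rw [hkeys]
  refine List.map_congr_left (fun role _ => ?_)
  rw [PySem.Dict.getD_foldl_modify_append]
  simp [PySem.Dict.getD_empty]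

-- ===== VERDICT (by name: the statement is the Claim_ definition above) =====
theorem role2nodes_spec : Claim_equal_role2nodes := by
  intro nodes_roles _ _
  unfold Spec_role2nodes role2nodes role2nodes_alt
  -- normalise A's inner body, then turn the nested folds into one fold over the flattened pairs
  have hA : ∀ (init : PySem.Dict String (List String)) (node : String) (rs : List String),
      rs.foldl (fun roles role =>
          let roles' := if role ∈ PySem.Dict.keys roles then roles
                        else PySem.Dict.insert roles role ([] : List String)
          PySem.Dict.modify roles' role [] (fun l => l ++ [node])) init
      = (rs.map (fun role => (role, node))).foldl
          (fun d p => PySem.Dict.modify d p.1 [] (fun l => l ++ [p.2])) init := by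
    intro init node rs
    rw [List.foldl_map]
    have hfun : (fun (roles : PySem.Dict String (List String)) (role : String) =>
        let roles' := if role ∈ PySem.Dict.keys roles then roles
                      else PySem.Dict.insert roles role ([] : List String)
        PySem.Dict.modify roles' role [] (fun l => l ++ [node]))
        = fun roles role => PySem.Dict.modify roles role [] (fun l => l ++ [node]) :=
      funext fun d => funext fun role => bodyEq d role node
    rw [hfun]
  simp only [hA, ← List.foldl_flatMap]
  rw [groupedItems,
    PySem.Dict.items_foldl_insert_fresh _ (fun r => r) _ PySem.Dict.empty
      (fun a _ => PySem.Dict.contains_empty a)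
      (by simp)]
  rfl
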